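-- pv_equiv track=rewrite | github.com/JFrunk/bridge-bidding-app | backend/engine/imports/bws_importer.py | calculate_contract_score
-- ===== SOURCE A (Python) =====
-- def calculate_contract_score(level: int, strain: str, tricks_made: int,
--                             doubled: int, vulnerable: bool, declarer_ns: bool) -> int:
--     """
--     Calculate bridge contract score.
--
--     Args:
--         level: Contract level (1-7)
--         strain: C, D, H, S, or NT
--         tricks_made: Total tricks made (0-13)
--         doubled: 0=undoubled, 1=doubled, 2=redoubled
--         vulnerable: Whether declarer is vulnerable
--         declarer_ns: True if NS declares
--
--     Returns:
--         Score from NS perspective (positive = NS gain)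
--     """
--     required = 6 + level
--     overtricks = tricks_made - required
--
--     if overtricks < 0:
--         # Down
--         undertricks = -overtricks
--         if doubled == 0:
--             penalty = undertricks * (100 if vulnerable else 50)
--         elif doubled == 1:
--             if vulnerable:
--                 penalty = 200 + (undertricks - 1) * 300 if undertricks > 1 else 200
--             else:
--                 if undertricks == 1:
--                     penalty = 100
--                 elif undertricks == 2:
--                     penalty = 300
--                 elif undertricks == 3:
--                     penalty = 500
--                 else:
--                     penalty = 500 + (undertricks - 3) * 300
--         else:  # Redoubled
--             penalty = calculate_contract_score(level, strain, tricks_made, 1, vulnerable, declarer_ns) * 2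
--             if declarer_ns:
--                 return -penalty
--             return penalty
--
--         score = -penalty if declarer_ns else penalty
--     else:
--         # Made
--         # Trick score
--         if strain in ['C', 'D']:
--             trick_value = 20
--         elif strain in ['H', 'S']:
--             trick_value = 30
--         else:  # NT
--             trick_value = 40 + (level - 1) * 30 if level > 1 else 40
--             trick_value = 40 + 30 * (level - 1)  # First trick 40, rest 30
--
--         if strain == 'NT':
--             base_score = 40 + 30 * (level - 1)
--         else:
--             base_score = level * trick_value
--
--         if doubled == 1:
--             base_score *= 2
--         elif doubled == 2:
--             base_score *= 4
--
--         # Bonuses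
--         bonus = 0
--
--         # Game bonus
--         if base_score >= 100:
--             bonus += 500 if vulnerable else 300
--         else:
--             bonus += 50  # Part score
--
--         # Slam bonus
--         if level == 6:
--             bonus += 750 if vulnerable else 500
--         elif level == 7:
--             bonus += 1500 if vulnerable else 1000
--
--         # Doubled/redoubled making bonus
--         if doubled == 1:
--             bonus += 50
--         elif doubled == 2:
--             bonus += 100
--
--         # Overtrick value
--         if doubled == 0:
--             overtrick_value = trick_value
--         elif doubled == 1:
--             overtrick_value = 200 if vulnerable else 100
--         else:
--             overtrick_value = 400 if vulnerable else 200
--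
--         score = base_score + bonus + overtricks * overtrick_value
--         if not declarer_ns:
--             score = -score
--
--     return score
-- ===== SOURCE B (Python) =====
-- def calculate_contract_score(level: int, strain: str, tricks_made: int,
--                              doubled: int, vulnerable: bool, declarer_ns: bool) -> int:
--     over = tricks_made - 6 - level
--     if over < 0:
--         # Down: closed-form penalty. Doubled penalties are 300 per undertrick
--         # minus a fixed correction (100 vul; non-vul additionally saves
--         # 100*min(u,3) for the cheaper first three tricks).
--         u = -over
--         if doubled == 0:
--             penalty = u * (100 if vulnerable else 50)
--         else:
--             penalty = 300 * u - 100
--             if not vulnerable: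
--                 penalty -= 100 * min(u, 3)
--             if doubled != 1:
--                 penalty *= 2  # redoubled = doubled x 2
--         return -penalty if declarer_ns else penalty
--     # Made: table-driven scoring.
--     tv = {'C': 20, 'D': 20, 'H': 30, 'S': 30}.get(strain, 30 * level + 10)
--     base = (tv if strain == 'NT' else level * tv) * {1: 2, 2: 4}.get(doubled, 1)
--     bonus = ((500 if vulnerable else 300) if base >= 100 else 50) \
--         + {6: 750 if vulnerable else 500, 7: 1500 if vulnerable else 1000}.get(level, 0) \
--         + {1: 50, 2: 100}.get(doubled, 0)
--     ov = tv if doubled == 0 else (200 if vulnerable else 100) * (1 if doubled == 1 else 2)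
--     score = base + bonus + over * ov
--     return score if declarer_ns else -score
-- ===== Notes on version B (the rewrite author's own statement) =====
-- stated objective: simpler
-- what changed: B computes undertrick penalties by a closed-form formula (300*u - 100 - 100*min(u,3) non-vulnerable, with redoubled = doubled x 2 applied to the unsigned penalty) instead of A's per-count case chains and recursive call, and replaces A's branch chains for trick value, doubling multiplier, slam bonus and doubled bonus by table (dict) lookups; the NS sign is applied once at the end of each branch.
-- intended difference: On down contracts with doubled not in {0,1} and declarer_ns=True, A's redoubled early return negates the already NS-signed doubled score and returns a positive score (e.g. +200 at (1,'C',6,2,False,True)) although the declaring side went down; B returns the intended negative value (-200). — e.g. on calculate_contract_score(1, "C", 6, 2, false, true): A returns 200, B returns -200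
import Mathlib
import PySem

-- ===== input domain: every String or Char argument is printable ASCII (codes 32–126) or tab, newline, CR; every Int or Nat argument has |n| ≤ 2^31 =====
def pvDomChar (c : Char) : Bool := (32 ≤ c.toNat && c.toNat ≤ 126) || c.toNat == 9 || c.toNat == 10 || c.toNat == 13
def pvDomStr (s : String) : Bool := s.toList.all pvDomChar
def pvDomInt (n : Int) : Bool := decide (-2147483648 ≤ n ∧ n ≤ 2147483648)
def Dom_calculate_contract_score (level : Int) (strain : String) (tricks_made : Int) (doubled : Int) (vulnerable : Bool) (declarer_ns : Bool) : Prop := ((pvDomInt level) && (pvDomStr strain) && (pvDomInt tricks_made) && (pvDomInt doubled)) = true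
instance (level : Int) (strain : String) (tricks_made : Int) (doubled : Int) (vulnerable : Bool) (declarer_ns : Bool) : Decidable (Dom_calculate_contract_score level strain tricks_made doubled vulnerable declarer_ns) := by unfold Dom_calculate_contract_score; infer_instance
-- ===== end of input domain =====

-- B replaces A's per-undertrick case chains by a closed-form penalty formula and A's
-- branch-heavy made-contract scoring by table lookups; B also fixes A's sign on redoubled
-- down contracts declared by NS (see D_ below).

-- ===== PORT A =====
-- A-side helpers: the local computations of A's made/down branches, step for step.
def pvA_trickValue1 (strain : String) (level : Int) : Int :=
  if strain == "C" || strain == "D" then 20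
  else if strain == "H" || strain == "S" then 30
  else if level > 1 then 40 + (level - 1) * 30 else 40

def pvA_trickValue (strain : String) (level : Int) : Int :=
  if strain == "C" || strain == "D" then 20
  else if strain == "H" || strain == "S" then 30
  else 40 + 30 * (level - 1)

def pvA_penaltyDoubled (undertricks : Int) (vulnerable : Bool) : Int :=
  if vulnerable then
    if undertricks > 1 then 200 + (undertricks - 1) * 300 else 200
  else
    if undertricks == 1 then 100
    else if undertricks == 2 then 300
    else if undertricks == 3 then 500
    else 500 + (undertricks - 3) * 300

def calculate_contract_score (level : Int) (strain : String) (tricks_made : Int) (doubled : Int) (vulnerable : Bool) (declarer_ns : Bool) : Int :=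
  let required := 6 + level
  let overtricks := tricks_made - required
  if overtricks < 0 then
    let undertricks := -overtricks
    if doubled == 0 then
      let penalty := undertricks * (if vulnerable then 100 else 50)
      if declarer_ns then -penalty else penalty
    else if doubled == 1 then
      let penalty := pvA_penaltyDoubled undertricks vulnerable
      if declarer_ns then -penalty else penalty
    else
      -- Redoubled: doubled score times two, then A's early-return sign handling
      let penalty := calculate_contract_score level strain tricks_made 1 vulnerable declarer_ns * 2
      if declarer_ns then -penalty else penalty
  else
    let trick_value := pvA_trickValue1 strain level
    -- Python reassigns trick_value unconditionally on the next line
    let trick_value := pvA_trickValue strain level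
    let base_score := if strain == "NT" then 40 + 30 * (level - 1) else level * trick_value
    let base_score := if doubled == 1 then base_score * 2
                      else if doubled == 2 then base_score * 4 else base_score
    let bonus : Int := 0
    let bonus := bonus + (if base_score ≥ 100 then (if vulnerable then 500 else 300) else 50)
    let bonus := bonus + (if level == 6 then (if vulnerable then 750 else 500)
                          else if level == 7 then (if vulnerable then 1500 else 1000) else 0)
    let bonus := bonus + (if doubled == 1 then 50 else if doubled == 2 then 100 else 0)
    let overtrick_value := if doubled == 0 then trick_value
                           else if doubled == 1 then (if vulnerable then 200 else 100)
                           else (if vulnerable then 400 else 200)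
    let score := base_score + bonus + overtricks * overtrick_value
    if !declarer_ns then -score else score
termination_by (if doubled == 1 then 0 else 1 : Nat)
decreasing_by simp_all

-- ===== PORT B =====
def calculate_contract_score_alt (level : Int) (strain : String) (tricks_made : Int) (doubled : Int) (vulnerable : Bool) (declarer_ns : Bool) : Int :=
  let ovr := tricks_made - 6 - level
  if ovr < 0 then
    let u := -ovr
    let penalty :=
      if doubled == 0 then u * (if vulnerable then 100 else 50)
      else
        let p := 300 * u - 100
        let p := if !vulnerable then p - 100 * min u 3 else p
        if doubled != 1 then p * 2 else p
    if declarer_ns then -penalty else penalty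
  else
    let tv := (PySem.Dict.ofList [("C", (20:Int)), ("D", 20), ("H", 30), ("S", 30)]).getD strain (30 * level + 10)
    let base := (if strain == "NT" then tv else level * tv) *
                (PySem.Dict.ofList [((1:Int), (2:Int)), (2, 4)]).getD doubled 1
    let bonus := (if base ≥ 100 then (if vulnerable then (500:Int) else 300) else 50)
      + (PySem.Dict.ofList [((6:Int), if vulnerable then (750:Int) else 500), (7, if vulnerable then 1500 else 1000)]).getD level 0
      + (PySem.Dict.ofList [((1:Int), (50:Int)), (2, 100)]).getD doubled 0
    let ov := if doubled == 0 then tv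
              else (if vulnerable then 200 else 100) * (if doubled == 1 then 1 else 2)
    let score := base + bonus + ovr * ov
    if declarer_ns then score else -score

-- ===== PRECONDITION & SPEC =====
-- On down contracts with doubled not in {0,1} and declarer_ns=True, A's early return negates
-- the already NS-signed doubled score, so A returns a positive score although the declaring
-- side went down; B returns the intended negative value.
def D_calculate_contract_score (level : Int) (strain : String) (tricks_made : Int) (doubled : Int) (vulnerable : Bool) (declarer_ns : Bool) : Prop :=
  tricks_made - 6 - level < 0 ∧ doubled ≠ 0 ∧ doubled ≠ 1 ∧ declarer_ns = true
instance (level : Int) (strain : String) (tricks_made : Int) (doubled : Int) (vulnerable : Bool) (declarer_ns : Bool) : Decidable (D_calculate_contract_score level strain tricks_made doubled vulnerable declarer_ns) := by unfold D_calculate_contract_score; infer_instance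

def Spec_calculate_contract_score (level : Int) (strain : String) (tricks_made : Int) (doubled : Int) (vulnerable : Bool) (declarer_ns : Bool) (out : Int) : Prop := ¬ D_calculate_contract_score level strain tricks_made doubled vulnerable declarer_ns → out = calculate_contract_score_alt level strain tricks_made doubled vulnerable declarer_ns
instance (level : Int) (strain : String) (tricks_made : Int) (doubled : Int) (vulnerable : Bool) (declarer_ns : Bool) (out : Int) : Decidable (Spec_calculate_contract_score level strain tricks_made doubled vulnerable declarer_ns out) := by unfold Spec_calculate_contract_score; infer_instance

def pvDiffWitness_calculate_contract_score : Int × String × Int × Int × Bool × Bool := (1, "C", 6, 2, false, true)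
def pvDiffWitnessOut_calculate_contract_score : Int × Int := (200, -200)

-- ===== CLAIM (what is proved, stated in full; the proofs are below) =====
def Claim_unchanged_calculate_contract_score : Prop := ∀ (level : Int) (strain : String) (tricks_made : Int) (doubled : Int) (vulnerable : Bool) (declarer_ns : Bool), Dom_calculate_contract_score level strain tricks_made doubled vulnerable declarer_ns → Spec_calculate_contract_score level strain tricks_made doubled vulnerable declarer_ns (calculate_contract_score level strain tricks_made doubled vulnerable declarer_ns)
def Claim_changed_calculate_contract_score : Prop := Dom_calculate_contract_score (pvDiffWitness_calculate_contract_score.1) (pvDiffWitness_calculate_contract_score.2.1) (pvDiffWitness_calculate_contract_score.2.2.1) (pvDiffWitness_calculate_contract_score.2.2.2.1) (pvDiffWitness_calculate_contract_score.2.2.2.2.1) (pvDiffWitness_calculate_contract_score.2.2.2.2.2) ∧ D_calculate_contract_score (pvDiffWitness_calculate_contract_score.1) (pvDiffWitness_calculate_contract_score.2.1) (pvDiffWitness_calculate_contract_score.2.2.1) (pvDiffWitness_calculate_contract_score.2.2.2.1) (pvDiffWitness_calculate_contract_score.2.2.2.2.1) (pvDiffWitness_calculate_contract_score.2.2.2.2.2)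 ∧ calculate_contract_score (pvDiffWitness_calculate_contract_score.1) (pvDiffWitness_calculate_contract_score.2.1) (pvDiffWitness_calculate_contract_score.2.2.1) (pvDiffWitness_calculate_contract_score.2.2.2.1) (pvDiffWitness_calculate_contract_score.2.2.2.2.1) (pvDiffWitness_calculate_contract_score.2.2.2.2.2) = pvDiffWitnessOut_calculate_contract_score.1 ∧ calculate_contract_score_alt (pvDiffWitness_calculate_contract_score.1) (pvDiffWitness_calculate_contract_score.2.1) (pvDiffWitness_calculate_contract_score.2.2.1) (pvDiffWitness_calculate_contract_score.2.2.2.1) (pvDiffWitness_calculate_contract_score.2.2.2.2.1) (pvDiffWitness_calculate_contract_score.2.2.2.2.2) = pvDiffWitnessOut_calculate_contract_score.2 ∧ pvDiffWitnessOut_calculate_contract_score.1 ≠ pvDiffWitnessOut_calculate_contract_score.2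
def Claim_exact_calculate_contract_score : Prop := ∀ (level : Int) (strain : String) (tricks_made : Int) (doubled : Int) (vulnerable : Bool) (declarer_ns : Bool), Dom_calculate_contract_score level strain tricks_made doubled vulnerable declarer_ns → D_calculate_contract_score level strain tricks_made doubled vulnerable declarer_ns → calculate_contract_score level strain tricks_made doubled vulnerable declarer_ns ≠ calculate_contract_score_alt level strain tricks_made doubled vulnerable declarer_ns

-- ===== LEMMAS AND PROOFS =====
set_option maxRecDepth 4000
set_option maxHeartbeats 1000000
theorem pv_g1 (s : String) (dflt : Int) : (PySem.Dict.ofList [("C",(20:Int)),("D",20),("H",30),("S",30)]).getD s dflt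
    = if "C" = s then 20 else if "D" = s then 20 else if "H" = s then 30 else if "S" = s then 30 else dflt := by
  have hof : (PySem.Dict.ofList [("C",(20:Int)),("D",20),("H",30),("S",30)])
      = PySem.Dict.mk [("C",20),("D",20),("H",30),("S",30)] := rfl
  have hnil : (PySem.Dict.mk ([] : List (String × Int))).get? s = none := rfl
  rw [hof]
  simp only [PySem.Dict.getD, PySem.Dict.get?_mk_cons, beq_iff_eq, hnil]
  split_ifs <;> rfl

theorem pv_g2 (d : Int) : (PySem.Dict.ofList [((1:Int),(2:Int)),(2,4)]).getD d 1
    = if d = 1 then 2 else if d = 2 then 4 else 1 := by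
  have hof : (PySem.Dict.ofList [((1:Int),(2:Int)),(2,4)]) = PySem.Dict.mk [(1,2),(2,4)] := rfl
  have hnil : (PySem.Dict.mk ([] : List (Int × Int))).get? d = none := rfl
  rw [hof]
  simp only [PySem.Dict.getD, PySem.Dict.get?_mk_cons, beq_iff_eq, hnil]
  split_ifs <;> first | rfl | omega

theorem pv_g3 (x y l : Int) : (PySem.Dict.ofList [((6:Int), x), (7, y)]).getD l 0
    = if l = 6 then x else if l = 7 then y else 0 := by
  have hof : (PySem.Dict.ofList [((6:Int), x), (7, y)]) = PySem.Dict.mk [(6,x),(7,y)] := rfl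
  have hnil : (PySem.Dict.mk ([] : List (Int × Int))).get? l = none := rfl
  rw [hof]
  simp only [PySem.Dict.getD, PySem.Dict.get?_mk_cons, beq_iff_eq, hnil]
  split_ifs <;> first | rfl | omega

theorem pv_g4 (d : Int) : (PySem.Dict.ofList [((1:Int),(50:Int)),(2,100)]).getD d 0
    = if d = 1 then 50 else if d = 2 then 100 else 0 := by
  have hof : (PySem.Dict.ofList [((1:Int),(50:Int)),(2,100)]) = PySem.Dict.mk [(1,50),(2,100)] := rfl
  have hnil : (PySem.Dict.mk ([] : List (Int × Int))).get? d = none := rfl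
  rw [hof]
  simp only [PySem.Dict.getD, PySem.Dict.get?_mk_cons, beq_iff_eq, hnil]
  split_ifs <;> first | rfl | omega

theorem pv_tv_eq (s : String) (l : Int) : pvA_trickValue s l
    = (PySem.Dict.ofList [("C",(20:Int)),("D",20),("H",30),("S",30)]).getD s (30 * l + 10) := by
  rw [pv_g1]
  unfold pvA_trickValue
  by_cases hC : s = "C"
  · simp [hC]
  · by_cases hD : s = "D"
    · simp [hD]
    · by_cases hH : s = "H"
      · simp [hH]
      · by_cases hS : s = "S"
        · simp [hS]
        · simp [hC, hD, hH, hS, Ne.symm hC, Ne.symm hD, Ne.symm hH, Ne.symm hS]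
          ring

theorem calculate_contract_score_spec : Claim_unchanged_calculate_contract_score := by
  intro level strain tricks_made doubled vulnerable declarer_ns hDom hD
  unfold D_calculate_contract_score at hD
  show calculate_contract_score level strain tricks_made doubled vulnerable declarer_ns = _
  by_cases h0 : tricks_made - (6 + level) < 0
  · -- down
    have h0' : tricks_made - 6 - level < 0 := by omega
    rw [calculate_contract_score]
    unfold calculate_contract_score_alt pvA_penaltyDoubled
    by_cases hd0 : doubled = 0
    · subst hd0
      cases vulnerable <;> cases declarer_ns <;>
        simp [h0, h0'] <;> omega
    · by_cases hd1 : doubled = 1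
      · subst hd1
        cases vulnerable <;> cases declarer_ns <;>
          simp [h0, h0', min_def] <;> omega
      · have hns : declarer_ns = false := by
          cases declarer_ns
          · rfl
          · exact absurd ⟨by omega, hd0, hd1, rfl⟩ hD
        subst hns
        rw [calculate_contract_score]
        have hbd : (doubled == 0) = false := by simp [hd0]
        have hbd1 : (doubled == 1) = false := by simp [hd1]
        unfold pvA_penaltyDoubled
        cases vulnerable <;>
          simp [h0, h0', hbd, hbd1, min_def] <;> omega
  · -- made
    have h0' : ¬ tricks_made - 6 - level < 0 := by omega
    have e2 : tricks_made - (6 + level) = tricks_made - 6 - level := by ring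
    rw [calculate_contract_score]
    unfold calculate_contract_score_alt
    by_cases hC : strain = "C"
    · subst hC
      cases vulnerable <;> cases declarer_ns <;>
        simp [h0', pv_tv_eq, pv_g1, pv_g2, pv_g3, pv_g4, e2]
    · by_cases hDi : strain = "D"
      · subst hDi
        cases vulnerable <;> cases declarer_ns <;>
          simp [h0', pv_tv_eq, pv_g1, pv_g2, pv_g3, pv_g4, e2]
      · by_cases hH : strain = "H"
        · subst hH
          cases vulnerable <;> cases declarer_ns <;>
            simp [h0', pv_tv_eq, pv_g1, pv_g2, pv_g3, pv_g4, e2]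
        · by_cases hS : strain = "S"
          · subst hS
            cases vulnerable <;> cases declarer_ns <;>
              simp [h0', pv_tv_eq, pv_g1, pv_g2, pv_g3, pv_g4, e2]
          · by_cases hNT : strain = "NT"
            · subst hNT
              cases vulnerable <;> cases declarer_ns <;>
                simp [h0', pv_tv_eq, pv_g1, pv_g2, pv_g3, pv_g4, e2] <;>
                split_ifs <;> first | rfl | omega
            · cases vulnerable <;> cases declarer_ns <;>
                simp [h0', pv_tv_eq, pv_g1, pv_g2, pv_g3, pv_g4, e2,
                  hNT, Ne.symm hC, Ne.symm hDi, Ne.symm hH, Ne.symm hS]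
theorem calculate_contract_score_changed : Claim_changed_calculate_contract_score := by
  unfold Claim_changed_calculate_contract_score
  refine ⟨by decide, by decide, ?_, by decide, by decide⟩
  show calculate_contract_score 1 "C" 6 2 false true = 200
  simp [calculate_contract_score, pvA_penaltyDoubled]
theorem calculate_contract_score_tight : Claim_exact_calculate_contract_score := by
  intro level strain tricks_made doubled vulnerable declarer_ns hDom hDc
  unfold D_calculate_contract_score at hDc
  obtain ⟨h0', hd0, hd1, hns⟩ := hDc
  subst hns
  have h0 : tricks_made - (6 + level) < 0 := by omega
  rw [calculate_contract_score, calculate_contract_score]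
  unfold calculate_contract_score_alt pvA_penaltyDoubled
  have hbd : (doubled == 0) = false := by simp [hd0]
  have hbd1 : (doubled == 1) = false := by simp [hd1]
  cases vulnerable <;>
    simp [h0, h0', hbd, hbd1, min_def] <;> omega
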